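-- pv_equiv track=rewrite | github.com/jarek-bir/Reconcli | reconcli/urlcli.py | categorize_urls
-- ===== SOURCE A (Python) =====
-- def categorize_urls(urls):
--     categories = {"xss": [], "lfi": [], "redirect": [], "other": []}
--     for url in urls:
--         lowered = url.lower()
--         if any(
--             x in lowered for x in ["<script", "onerror", "alert(", "document.cookie"]
--         ):
--             categories["xss"].append(url)
--         elif any(x in lowered for x in ["../", "..\\", "/etc/passwd", "boot.ini"]):
--             categories["lfi"].append(url)
--         elif any(x in lowered for x in ["url=", "redirect", "next=", "return="]):
--             categories["redirect"].append(url)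
--         else:
--             categories["other"].append(url)
--     return categories
-- ===== SOURCE B (Python) =====
-- def categorize_urls(urls):
--     rules = [
--         ("xss", ["<script", "onerror", "alert(", "document.cookie"]),
--         ("lfi", ["../", "..\\", "/etc/passwd", "boot.ini"]),
--         ("redirect", ["url=", "redirect", "next=", "return="]),
--     ]
--
--     def label(url):
--         lowered = url.lower()
--         for name, patterns in rules:
--             if any(p in lowered for p in patterns):
--                 return name
--         return "other"
--
--     labeled = [(label(u), u) for u in urls]
--     return {name: [u for tag, u in labeled if tag == name]
--             for name in ("xss", "lfi", "redirect", "other")}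
-- ===== Notes on version B (the rewrite author's own statement) =====
-- stated objective: simpler
-- what changed: Replaces the if/elif chain appending into a mutable dict by a data-driven ordered rule table with a first-match label function, then groups the labeled urls into the four categories by comprehension.
import Mathlib
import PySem

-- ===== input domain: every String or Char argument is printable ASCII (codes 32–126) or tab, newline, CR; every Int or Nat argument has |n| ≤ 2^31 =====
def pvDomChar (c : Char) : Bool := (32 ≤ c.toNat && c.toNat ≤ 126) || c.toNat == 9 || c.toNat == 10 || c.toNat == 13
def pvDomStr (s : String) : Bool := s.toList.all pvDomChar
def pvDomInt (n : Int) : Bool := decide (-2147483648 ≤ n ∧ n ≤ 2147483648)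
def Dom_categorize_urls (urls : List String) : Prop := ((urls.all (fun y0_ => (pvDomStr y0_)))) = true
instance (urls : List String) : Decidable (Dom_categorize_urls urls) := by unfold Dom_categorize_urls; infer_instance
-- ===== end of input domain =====

-- B replaces A's if/elif chain appending into a mutable dict by an ordered rule table with a
-- first-match label function, then groups the labeled urls per category (same cost, simpler decomposition).


-- ===== PORT A =====
-- one loop iteration: lower the url, test the three pattern groups in order, append into the dict
def catStep (d : PySem.Dict String (List String)) (url : String) : PySem.Dict String (List String) :=
  let lowered := PySem.Str.lower url
  if (["<script", "onerror", "alert(", "document.cookie"].any fun x => PySem.Str.isIn x lowered) then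
    d.modify "xss" [] (· ++ [url])
  else if (["../", "..\\", "/etc/passwd", "boot.ini"].any fun x => PySem.Str.isIn x lowered) then
    d.modify "lfi" [] (· ++ [url])
  else if (["url=", "redirect", "next=", "return="].any fun x => PySem.Str.isIn x lowered) then
    d.modify "redirect" [] (· ++ [url])
  else
    d.modify "other" [] (· ++ [url])

def categorize_urls (urls : List String) : List (String × List String) :=
  (urls.foldl catStep
    (PySem.Dict.ofList [("xss", []), ("lfi", []), ("redirect", []), ("other", [])])).items

-- ===== PORT B =====
def pyRules : List (String × List String) :=
  [("xss", ["<script", "onerror", "alert(", "document.cookie"]),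
   ("lfi", ["../", "..\\", "/etc/passwd", "boot.ini"]),
   ("redirect", ["url=", "redirect", "next=", "return="])]

-- first rule whose pattern list matches the lowered url; "other" if none
def urlLabel (url : String) : String :=
  let lowered := PySem.Str.lower url
  match pyRules.find? (fun r => r.2.any fun p => PySem.Str.isIn p lowered) with
  | some r => r.1
  | none => "other"

def categorize_urls_alt (urls : List String) : List (String × List String) :=
  let labeled := urls.map fun u => (urlLabel u, u)
  ["xss", "lfi", "redirect", "other"].map fun name =>
    (name, (labeled.filter fun p => p.1 == name).map (·.2))

-- ===== PRECONDITION & SPEC =====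
def Spec_categorize_urls (urls : List String) (out : List (String × List String)) : Prop := out = categorize_urls_alt urls
instance (urls : List String) (out : List (String × List String)) : Decidable (Spec_categorize_urls urls out) := by unfold Spec_categorize_urls; infer_instance

-- ===== CLAIM (what is proved, stated in full; the proofs are below) =====
def Claim_equal_categorize_urls : Prop := ∀ (urls : List String), Dom_categorize_urls urls → Spec_categorize_urls urls (categorize_urls urls)

-- ===== LEMMAS AND PROOFS =====

-- B's per-category output, as a function of the remaining urls (proof bookkeeping)
def labGroup (name : String) (urls : List String) : List String :=
  ((urls.map fun u => (urlLabel u, u)).filter fun p => p.1 == name).map (·.2)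

lemma labGroup_cons (name u : String) (cs : List String) :
    labGroup name (u :: cs) = (if urlLabel u == name then [u] else []) ++ labGroup name cs := by
  by_cases h : urlLabel u == name <;> simp [labGroup, h]

lemma urlLabel_xss (u : String)
    (h1 : (["<script", "onerror", "alert(", "document.cookie"].any fun x => PySem.Str.isIn x (PySem.Str.lower u)) = true) :
    urlLabel u = "xss" := by
  simp only [urlLabel, pyRules, List.find?, h1]

lemma urlLabel_lfi (u : String)
    (h1 : (["<script", "onerror", "alert(", "document.cookie"].any fun x => PySem.Str.isIn x (PySem.Str.lower u)) = false)
    (h2 : (["../", "..\\", "/etc/passwd", "boot.ini"].any fun x => PySem.Str.isIn x (PySem.Str.lower u)) = true) :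
    urlLabel u = "lfi" := by
  simp only [urlLabel, pyRules, List.find?, h1, h2]

lemma urlLabel_redirect (u : String)
    (h1 : (["<script", "onerror", "alert(", "document.cookie"].any fun x => PySem.Str.isIn x (PySem.Str.lower u)) = false)
    (h2 : (["../", "..\\", "/etc/passwd", "boot.ini"].any fun x => PySem.Str.isIn x (PySem.Str.lower u)) = false)
    (h3 : (["url=", "redirect", "next=", "return="].any fun x => PySem.Str.isIn x (PySem.Str.lower u)) = true) :
    urlLabel u = "redirect" := by
  simp only [urlLabel, pyRules, List.find?, h1, h2, h3]

lemma urlLabel_other (u : String)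
    (h1 : (["<script", "onerror", "alert(", "document.cookie"].any fun x => PySem.Str.isIn x (PySem.Str.lower u)) = false)
    (h2 : (["../", "..\\", "/etc/passwd", "boot.ini"].any fun x => PySem.Str.isIn x (PySem.Str.lower u)) = false)
    (h3 : (["url=", "redirect", "next=", "return="].any fun x => PySem.Str.isIn x (PySem.Str.lower u)) = false) :
    urlLabel u = "other" := by
  simp only [urlLabel, pyRules, List.find?, h1, h2, h3]

lemma catStep_inv (urls : List String) (a b c o : List String) :
    urls.foldl catStep (PySem.Dict.mk [("xss", a), ("lfi", b), ("redirect", c), ("other", o)])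
      = PySem.Dict.mk [("xss", a ++ labGroup "xss" urls), ("lfi", b ++ labGroup "lfi" urls),
          ("redirect", c ++ labGroup "redirect" urls), ("other", o ++ labGroup "other" urls)] := by
  induction urls generalizing a b c o with
  | nil => simp [labGroup]
  | cons u rest ih =>
    rw [List.foldl_cons]
    cases h1 : (["<script", "onerror", "alert(", "document.cookie"].any fun x => PySem.Str.isIn x (PySem.Str.lower u)) with
    | true =>
      have hstep : catStep (PySem.Dict.mk [("xss", a), ("lfi", b), ("redirect", c), ("other", o)]) u
          = PySem.Dict.mk [("xss", a ++ [u]), ("lfi", b), ("redirect", c), ("other", o)] := by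
        simp only [catStep, h1, if_true, PySem.Dict.modify, PySem.Dict.getD_eq_get?_getD,
          PySem.Dict.get?_mk_cons]
        apply PySem.Dict.ext
        simp [PySem.Dict.items_insert_of_contains]
      rw [hstep, ih]
      simp [labGroup_cons, urlLabel_xss u h1]
    | false =>
    cases h2 : (["../", "..\\", "/etc/passwd", "boot.ini"].any fun x => PySem.Str.isIn x (PySem.Str.lower u)) with
    | true =>
      have hstep : catStep (PySem.Dict.mk [("xss", a), ("lfi", b), ("redirect", c), ("other", o)]) u
          = PySem.Dict.mk [("xss", a), ("lfi", b ++ [u]), ("redirect", c), ("other", o)] := by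
        simp only [catStep, h1, h2, if_true, Bool.false_eq_true, if_false, PySem.Dict.modify,
          PySem.Dict.getD_eq_get?_getD, PySem.Dict.get?_mk_cons]
        apply PySem.Dict.ext
        simp [PySem.Dict.items_insert_of_contains]
      rw [hstep, ih]
      simp [labGroup_cons, urlLabel_lfi u h1 h2]
    | false =>
    cases h3 : (["url=", "redirect", "next=", "return="].any fun x => PySem.Str.isIn x (PySem.Str.lower u)) with
    | true =>
      have hstep : catStep (PySem.Dict.mk [("xss", a), ("lfi", b), ("redirect", c), ("other", o)]) u
          = PySem.Dict.mk [("xss", a), ("lfi", b), ("redirect", c ++ [u]), ("other", o)] := by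
        simp only [catStep, h1, h2, h3, if_true, Bool.false_eq_true, if_false, PySem.Dict.modify,
          PySem.Dict.getD_eq_get?_getD, PySem.Dict.get?_mk_cons]
        apply PySem.Dict.ext
        simp [PySem.Dict.items_insert_of_contains]
      rw [hstep, ih]
      simp [labGroup_cons, urlLabel_redirect u h1 h2 h3]
    | false =>
      have hstep : catStep (PySem.Dict.mk [("xss", a), ("lfi", b), ("redirect", c), ("other", o)]) u
          = PySem.Dict.mk [("xss", a), ("lfi", b), ("redirect", c), ("other", o ++ [u])] := by
        simp only [catStep, h1, h2, h3, Bool.false_eq_true, if_false, PySem.Dict.modify,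
          PySem.Dict.getD_eq_get?_getD, PySem.Dict.get?_mk_cons]
        apply PySem.Dict.ext
        simp [PySem.Dict.items_insert_of_contains]
      rw [hstep, ih]
      simp [labGroup_cons, urlLabel_other u h1 h2 h3]

-- ===== VERDICT (by name: the statement is the Claim_ definition above) =====
theorem categorize_urls_spec : Claim_equal_categorize_urls := by
  intro urls _
  show categorize_urls urls = categorize_urls_alt urls
  have hof : PySem.Dict.ofList ([("xss", []), ("lfi", []), ("redirect", []), ("other", [])] :
      List (String × List String))
      = PySem.Dict.mk [("xss", []), ("lfi", []), ("redirect", []), ("other", [])] := by decide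
  simp [categorize_urls, hof, catStep_inv, categorize_urls_alt, labGroup]
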